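-- pv_equiv track=rewrite | github.com/AlphaTechnic/Algorithm_Study | 2021_random_set_self_practice/using_python/기능개발.py | solution
-- ===== SOURCE A (Python) =====
-- def get_remains(progresses, speeds):
--     remains = []
--     for i, progress in enumerate(progresses):
--         piv = (100 - progress) // speeds[i]
--         if (100 - progress) % speeds[i] == 0:
--             remains.append(piv)
--         else:
--             remains.append(piv + 1)
--     return remains
--
-- def solution(progresses, speeds):
--     remains = get_remains(progresses, speeds)
--     if len(remains) == 1:
--         return [1]
--
--     ans = []
--     pos = 0
--     cnt = 1
--     i = 1
--     while True:
--         if remains[pos] >= remains[pos + i]: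
--             cnt += 1
--             i += 1
--         else:
--             ans.append(cnt)
--             pos = pos + i
--             cnt = 1
--             i = 1
--
--         if pos + i == len(remains):
--             ans.append(cnt)
--             break
--
--     return ans
-- ===== SOURCE B (Python) =====
-- def solution(progresses, speeds):
--     remains = [-((p - 100) // s) for p, s in zip(progresses, speeds)]
--     m = remains[0]
--     maxes = []
--     for r in remains:
--         m = max(m, r)
--         maxes.append(m)
--     edges = [0] + [j + 1 for j, (r, mx) in enumerate(zip(remains[1:], maxes)) if r > mx] + [len(remains)]
--     return [b - a for a, b in zip(edges, edges[1:])]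
-- ===== Notes on version B (the rewrite author's own statement) =====
-- stated objective: alternative
-- what changed: Replaces A's cursor-walk that counts each group against its leader with a staged-pass algorithm: build a prefix-maximum array over the remaining-days list, collect the indices where an element exceeds the running maximum of its strict prefix (the group boundaries), and return the adjacent differences of the 0/boundary/length edge list.
import Mathlib
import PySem

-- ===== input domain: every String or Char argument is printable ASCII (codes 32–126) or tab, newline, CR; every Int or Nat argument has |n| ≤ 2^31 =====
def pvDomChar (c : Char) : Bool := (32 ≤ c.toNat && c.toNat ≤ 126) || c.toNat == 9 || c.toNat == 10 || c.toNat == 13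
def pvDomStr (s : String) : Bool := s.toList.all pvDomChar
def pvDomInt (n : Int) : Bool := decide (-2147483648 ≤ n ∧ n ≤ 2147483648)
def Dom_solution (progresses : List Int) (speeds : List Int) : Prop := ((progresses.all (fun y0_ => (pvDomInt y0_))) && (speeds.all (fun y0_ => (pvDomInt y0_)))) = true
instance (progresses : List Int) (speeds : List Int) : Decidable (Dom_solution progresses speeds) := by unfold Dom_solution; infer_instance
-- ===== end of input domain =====

-- B replaces A's cursor-walk group counting with staged passes: a prefix-maximum array,
-- a list of group-boundary indices, and adjacent differences of the edge list (objective: alternative).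

-- ===== PORT A =====
-- get_remains: index-based loop; speeds[i] accessed with getD 0 — in range and nonzero under Pre_solution (Python raises otherwise).
def remLoopA (speeds : List Int) : Nat → List Int → List Int → List Int
  | _, [], acc => acc
  | i, p :: ps, acc =>
    let s := speeds.getD i 0
    let piv := PySem.Int.floordiv (100 - p) s
    remLoopA speeds (i+1) ps
      (acc ++ [if PySem.Int.mod (100 - p) s = 0 then piv else piv + 1])

def get_remainsA (progresses : List Int) (speeds : List Int) : List Int :=
  remLoopA speeds 0 progresses []

-- A's while-True loop; indices in range under Pre_solution (Python raises IndexError on empty input).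
def loopA (remains : List Int) (pos i : Nat) (cnt : Int) (ans : List Int) : List Int :=
  if _h : pos + i < remains.length then
    if remains.getD pos 0 ≥ remains.getD (pos + i) 0 then
      if pos + (i + 1) = remains.length then ans ++ [cnt + 1]
      else loopA remains pos (i + 1) (cnt + 1) ans
    else
      if (pos + i) + 1 = remains.length then (ans ++ [cnt]) ++ [1]
      else loopA remains (pos + i) 1 1 (ans ++ [cnt])
  else ans
termination_by remains.length - (pos + i)
decreasing_by all_goals omega

def solution (progresses : List Int) (speeds : List Int) : List Int :=
  let remains := get_remainsA progresses speeds
  if remains.length = 1 then [1]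
  else loopA remains 0 1 1 []

-- ===== PORT B =====
-- running-maximum pass: m = max(m, r); maxes.append(m)
def maxesLoopB : List Int → Int → List Int → List Int
  | [], _, acc => acc
  | r :: rs, m, acc => maxesLoopB rs (max m r) (acc ++ [max m r])

-- the comprehension [j + 1 for j, (r, mx) in enumerate(zip(remains[1:], maxes)) if r > mx]
def edgesLoopB : Nat → List (Int × Int) → List Int
  | _, [] => []
  | j, (r, mx) :: t => if mx < r then ((j : Int) + 1) :: edgesLoopB (j+1) t else edgesLoopB (j+1) t

def solution_alt (progresses : List Int) (speeds : List Int) : List Int :=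
  let remains := (progresses.zip speeds).map
    (fun ps => -(PySem.Int.floordiv (ps.1 - 100) ps.2))
  match remains with
  | [] => []   -- Python raises IndexError on remains[0]; outside Pre_solution
  | r0 :: rest =>
    let maxes := maxesLoopB remains r0 []
    let edges := (0 :: edgesLoopB 0 (rest.zip maxes)) ++ [(remains.length : Int)]
    (edges.zip (edges.drop 1)).map (fun ab => ab.2 - ab.1)

-- ===== PRECONDITION & SPEC =====
-- Pre excludes exactly the inputs where Python A raises: empty progresses (IndexError on remains[pos+i]),
-- speeds shorter than progresses (IndexError on speeds[i]), or a zero speed used (ZeroDivisionError).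
def Pre_solution (progresses : List Int) (speeds : List Int) : Prop :=
  progresses ≠ [] ∧ progresses.length ≤ speeds.length ∧
    ∀ s ∈ speeds.take progresses.length, s ≠ 0
instance (progresses : List Int) (speeds : List Int) : Decidable (Pre_solution progresses speeds) := by
  unfold Pre_solution; infer_instance

def pvWitness_solution : List Int × List Int := ([30, 95, 90], [2, 3, 1])

def Spec_solution (progresses : List Int) (speeds : List Int) (out : List Int) : Prop := out = solution_alt progresses speeds
instance (progresses : List Int) (speeds : List Int) (out : List Int) : Decidable (Spec_solution progresses speeds out) := by unfold Spec_solution; infer_instance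

-- ===== CLAIM (what is proved, stated in full; the proofs are below) =====
def Claim_equal_solution : Prop := ∀ (progresses : List Int) (speeds : List Int), Dom_solution progresses speeds → Pre_solution progresses speeds → Spec_solution progresses speeds (solution progresses speeds)

-- ===== LEMMAS AND PROOFS =====

-- ceiling-division identity: A's remainder-tested floordiv equals B's -((p-100)//s) for s ≠ 0
lemma ceil_eq (p s : Int) (hs : s ≠ 0) :
    (if PySem.Int.mod (100 - p) s = 0 then PySem.Int.floordiv (100 - p) s
     else PySem.Int.floordiv (100 - p) s + 1) = -(PySem.Int.floordiv (p - 100) s) := by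
  have h1 := PySem.Int.floordiv_mul_add_mod (100 - p) s
  have h2 := PySem.Int.floordiv_mul_add_mod (p - 100) s
  set q1 := PySem.Int.floordiv (100 - p) s with hq1
  set q2 := PySem.Int.floordiv (p - 100) s with hq2
  set r1 := PySem.Int.mod (100 - p) s with hr1
  set r2 := PySem.Int.mod (p - 100) s with hr2
  have hsum : (q1 + q2) * s + (r1 + r2) = 0 := by ring_nf; linarith
  rcases lt_or_gt_of_ne hs with h | h
  · have b1 := PySem.Int.mod_neg_bounds (100 - p) h
    have b2 := PySem.Int.mod_neg_bounds (p - 100) h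
    rw [← hr1] at b1; rw [← hr2] at b2
    split_ifs with hz
    · have hm : (q1 + q2) * s = -(r1 + r2) := by linarith
      have : q1 + q2 = 0 := by
        by_contra hne
        rcases lt_or_gt_of_ne hne with hlt | hgt
        · nlinarith
        · nlinarith
      linarith
    · have hm : (q1 + q2) * s = -(r1 + r2) := by linarith
      have hr1lt : r1 < 0 := lt_of_le_of_ne b1.2 hz
      have : q1 + q2 = -1 := by
        by_contra hne
        rcases lt_trichotomy (q1 + q2) (-1) with hlt | heq | hgt
        · nlinarith
        · exact hne heq
        · nlinarith
      linarith
  · have b1 : 0 ≤ r1 ∧ r1 < s := ⟨PySem.Int.mod_nonneg (100 - p) h, PySem.Int.mod_lt (100 - p) h⟩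
    have b2 : 0 ≤ r2 ∧ r2 < s := ⟨PySem.Int.mod_nonneg (p - 100) h, PySem.Int.mod_lt (p - 100) h⟩
    split_ifs with hz
    · have hm : (q1 + q2) * s = -(r1 + r2) := by linarith
      have : q1 + q2 = 0 := by
        by_contra hne
        rcases lt_or_gt_of_ne hne with hlt | hgt
        · nlinarith
        · nlinarith
      linarith
    · have hm : (q1 + q2) * s = -(r1 + r2) := by linarith
      have hr1lt : 0 < r1 := lt_of_le_of_ne b1.1 (Ne.symm hz)
      have : q1 + q2 = -1 := by
        by_contra hne
        rcases lt_trichotomy (q1 + q2) (-1) with hlt | heq | hgt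
        · nlinarith
        · exact hne heq
        · nlinarith
      linarith

-- remLoopA computes B's zip-map, shifted by the running index
lemma remLoopA_eq (speeds : List Int) :
    ∀ (ps : List Int) (i : Nat) (acc : List Int),
      ps.length + i ≤ speeds.length →
      (∀ s ∈ (speeds.drop i).take ps.length, s ≠ 0) →
      remLoopA speeds i ps acc
        = acc ++ (ps.zip (speeds.drop i)).map
            (fun x => -(PySem.Int.floordiv (x.1 - 100) x.2)) := by
  intro ps
  induction ps with
  | nil => intro i acc _ _; simp [remLoopA]
  | cons p ps ih =>
    intro i acc hlen hnz
    have hi : i < speeds.length := by simp at hlen; omega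
    have hdrop : speeds.drop i = speeds[i] :: speeds.drop (i + 1) :=
      List.drop_eq_getElem_cons hi
    have hget : speeds.getD i 0 = speeds[i] := List.getD_eq_getElem speeds 0 hi
    have hs0 : speeds[i] ≠ 0 := by
      apply hnz
      rw [hdrop]
      simp only [List.length_cons, List.take_succ_cons]
      exact List.mem_cons_self
    have hnz' : ∀ s ∈ (speeds.drop (i + 1)).take ps.length, s ≠ 0 := by
      intro s hsmem
      apply hnz
      rw [hdrop]
      simp only [List.length_cons, List.take_succ_cons]
      exact List.mem_cons_of_mem _ hsmem
    simp only [remLoopA, hget]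
    rw [ih (i + 1) _ (by simp at hlen ⊢; omega) hnz']
    rw [hdrop]
    simp only [List.zip_cons_cons, List.map_cons, List.append_assoc, List.singleton_append]
    rw [ceil_eq p speeds[i] hs0]

-- proof-side recursive form of A's grouping: pivot = current group leader, cnt = current group size
def grp : Int → Int → List Int → List Int
  | _, cnt, [] => [cnt]
  | pivot, cnt, r :: rs => if r ≤ pivot then grp pivot (cnt+1) rs else cnt :: grp r 1 rs

-- proof-side prefix maxima and the rest-with-running-max pairing
def scanMax : Int → List Int → List Int
  | _, [] => []
  | m, r :: rs => max m r :: scanMax (max m r) rs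

def pairup : Int → List Int → List (Int × Int)
  | _, [] => []
  | m, r :: rs => (r, m) :: pairup (max m r) rs

-- adjacent differences (B's final zip/map expression)
def diffs (xs : List Int) : List Int := (xs.zip (xs.drop 1)).map (fun ab => ab.2 - ab.1)

lemma diffs_cons (a b : Int) (t : List Int) :
    diffs (a :: b :: t) = (b - a) :: diffs (b :: t) := by
  simp [diffs]

lemma maxesLoopB_eq : ∀ (rs : List Int) (m : Int) (acc : List Int),
    maxesLoopB rs m acc = acc ++ scanMax m rs := by
  intro rs
  induction rs with
  | nil => intro m acc; simp [maxesLoopB, scanMax]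
  | cons r rs ih => intro m acc; simp [maxesLoopB, scanMax, ih]

lemma zip_scanMax_eq_pairup : ∀ (rs : List Int) (m : Int),
    rs.zip (m :: scanMax m rs) = pairup m rs := by
  intro rs
  induction rs with
  | nil => intro m; simp [pairup]
  | cons r rs ih => intro m; simp [scanMax, pairup, ih]

-- the crux: A's leader/count grouping equals B's edge-index differences with running maxima
lemma grp_eq_diffs : ∀ (rs : List Int) (m : Int) (j : Nat) (e : Int),
    grp m ((j : Int) + 1 - e) rs
      = diffs (e :: (edgesLoopB j (pairup m rs) ++ [(j : Int) + 1 + rs.length])) := by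
  intro rs
  induction rs with
  | nil =>
    intro m j e
    simp [grp, diffs, edgesLoopB, pairup]
  | cons r rs ih =>
    intro m j e
    by_cases hle : r ≤ m
    · have hlt : ¬ m < r := not_lt.mpr hle
      simp only [pairup, max_eq_left hle, edgesLoopB, grp]
      rw [if_neg hlt, if_pos hle]
      have harith : ((j : Int) + 1 - e) + 1 = ((j + 1 : Nat) : Int) + 1 - e := by push_cast; ring
      have hlen2 : (j : Int) + 1 + (((r :: rs).length : Nat) : Int)
          = ((j + 1 : Nat) : Int) + 1 + ((rs.length : Nat) : Int) := by
        simp only [List.length_cons]; push_cast; ring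
      rw [harith, ih m (j + 1) e, hlen2]
    · have hlt : m < r := not_le.mp hle
      simp only [pairup, max_eq_right (le_of_lt hlt), edgesLoopB, grp]
      rw [if_pos hlt, if_neg hle]
      rw [List.cons_append, diffs_cons]
      have hIH := ih r (j + 1) ((j : Int) + 1)
      have h1 : ((j + 1 : Nat) : Int) + 1 - ((j : Int) + 1) = 1 := by push_cast; ring
      rw [h1] at hIH
      congr 1
      rw [hIH]
      congr 1
      simp only [List.length_cons]
      push_cast
      ring_nf

-- A's (pos, i) cursor walk equals grp on the suffix
lemma loopA_eq_grp (remains : List Int) :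
    ∀ (k : Nat) (pos i : Nat) (cnt : Int) (ans : List Int),
      remains.length - (pos + i) = k →
      pos + i < remains.length →
      loopA remains pos i cnt ans
        = ans ++ grp (remains.getD pos 0) cnt (remains.drop (pos + i)) := by
  intro k
  induction k with
  | zero => intro pos i cnt ans hk hlt; omega
  | succ k ih =>
    intro pos i cnt ans hk hlt
    have hdrop : remains.drop (pos + i) = remains[pos + i] :: remains.drop (pos + i + 1) :=
      List.drop_eq_getElem_cons hlt
    have hget : remains.getD (pos + i) 0 = remains[pos + i] :=
      List.getD_eq_getElem remains 0 hlt
    rw [loopA, dif_pos hlt, hdrop]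
    by_cases hge : remains.getD pos 0 ≥ remains.getD (pos + i) 0
    · rw [if_pos hge]
      rw [hget] at hge
      by_cases hend : pos + (i + 1) = remains.length
      · rw [if_pos hend]
        have hnil : remains.drop (pos + i + 1) = [] := by
          apply List.drop_eq_nil_of_le; omega
        rw [hnil]
        simp only [grp]
        rw [if_pos hge]
      · rw [if_neg hend]
        rw [ih pos (i + 1) (cnt + 1) ans (by omega) (by omega)]
        have h2 : pos + (i + 1) = pos + i + 1 := by omega
        rw [h2]
        simp only [grp]
        rw [if_pos hge]
    · rw [if_neg hge]
      rw [hget] at hge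
      have hnle : ¬ remains[pos + i] ≤ remains.getD pos 0 := hge
      by_cases hend : pos + i + 1 = remains.length
      · rw [if_pos hend]
        have hnil : remains.drop (pos + i + 1) = [] := by
          apply List.drop_eq_nil_of_le; omega
        rw [hnil]
        simp only [grp]
        rw [if_neg hnle]
        simp
      · rw [if_neg hend]
        rw [ih (pos + i) 1 1 (ans ++ [cnt]) (by omega) (by omega), hget]
        simp only [grp]
        rw [if_neg hnle]
        simp

-- ===== VERDICT (by name: the statement is the Claim_ definition above) =====
theorem solution_spec : Claim_equal_solution := by
  unfold Claim_equal_solution Spec_solution Pre_solution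
  intro progresses speeds _ hpre
  obtain ⟨hne, hlen, hnz⟩ := hpre
  have hrem : get_remainsA progresses speeds
      = (progresses.zip speeds).map (fun x => -(PySem.Int.floordiv (x.1 - 100) x.2)) := by
    have hlen0 : progresses.length + 0 ≤ speeds.length := by omega
    have := remLoopA_eq speeds progresses 0 [] hlen0 (by simpa using hnz)
    simpa [get_remainsA] using this
  unfold solution solution_alt
  simp only [hrem]
  cases hz : (progresses.zip speeds).map (fun x => -(PySem.Int.floordiv (x.1 - 100) x.2)) with
  | nil =>
    exfalso
    have : (progresses.zip speeds).length = progresses.length := by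
      rw [List.length_zip]; omega
    cases progresses with
    | nil => exact hne rfl
    | cons a l => simp at hz; simp [hz] at this
  | cons r0 rest =>
    have hpair : rest.zip (maxesLoopB (r0 :: rest) r0 []) = pairup r0 rest := by
      rw [maxesLoopB_eq]
      simp only [List.nil_append]
      rw [show scanMax r0 (r0 :: rest) = r0 :: scanMax r0 rest from by simp [scanMax]]
      exact zip_scanMax_eq_pairup rest r0
    dsimp only
    rw [hpair, List.cons_append]
    have hkey := grp_eq_diffs rest r0 0 0
    simp only [diffs] at hkey
    have hL : (((r0 :: rest).length : Nat) : Int) = ((0 : Nat) : Int) + 1 + ((rest.length : Nat) : Int) := by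
      simp only [List.length_cons]; push_cast; ring
    rw [hL, ← hkey]
    have hc : ((0 : Nat) : Int) + 1 - 0 = (1 : Int) := by norm_num
    rw [hc]
    by_cases h1 : (r0 :: rest).length = 1
    · have hre : rest = [] := by simpa using h1
      subst hre
      rw [if_pos h1]
      simp [grp]
    · rw [if_neg h1]
      have hlt2 : 1 < (r0 :: rest).length := by
        rcases rest with _ | ⟨q, qs⟩
        · simp at h1
        · simp
      rw [loopA_eq_grp (r0 :: rest) ((r0 :: rest).length - 1) 0 1 1 [] (by omega) (by omega)]
      simp [List.getD]
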